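-- pv_equiv track=rewrite | github.com/ngiengkianyew/daily-coding-problem | solutions/problem_198.py | get_largest_subset
-- ===== SOURCE A (Python) =====
-- def get_largest_subset(arr, prev_num=1, curr_ind=0, prev_subset=[]):
--     if curr_ind == len(arr):
--         return prev_subset
--
--     curr_num = arr[curr_ind]
--
--     alt_0 = get_largest_subset(arr, prev_num, curr_ind + 1, prev_subset)
--     if curr_num % prev_num == 0:
--         alt_1 = get_largest_subset(
--             arr, curr_num, curr_ind + 1, prev_subset + [curr_num])
--         return alt_1 if len(alt_1) > len(alt_0) else alt_0
--
--     return alt_0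
-- ===== SOURCE B (Python) =====
-- def _best(d, pairs):
--     best = 0
--     for w, t in pairs:
--         if w % d == 0 and t > best:
--             best = t
--     return best
--
--
-- def get_largest_subset(arr, prev_num=1, curr_ind=0, prev_subset=[]):
--     # DP right-to-left over the tail: pairs[j] = (v, length of the longest
--     # divisible chain inside the tail starting with v at position j)
--     pairs = []
--     for v in reversed(arr[curr_ind:]):
--         pairs.insert(0, (v, 1 + _best(v, pairs)))
--     # left-to-right reconstruction: take an element only when it is strictly
--     # necessary for maximal length (ties prefer skipping)
--     res = list(prev_subset)
--     prev = prev_num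
--     while pairs:
--         v, t = pairs.pop(0)
--         if v % prev == 0 and t > _best(prev, pairs):
--             res.append(v)
--             prev = v
--     return res
-- ===== Notes on version B (the rewrite author's own statement) =====
-- stated objective: alternative
-- what changed: A's take/skip recursion over all subsequences (worst-case exponential) is replaced by an O(n^2) dynamic program (longest divisible chain starting at each position of the suffix, computed right-to-left) followed by a left-to-right reconstruction that takes an element only when strictly necessary for maximal length, matching A's skip-preferring tie-break; Pre_ excludes only the inputs where A raises (IndexError for out-of-range curr_ind, ZeroDivisionError for prev_num=0 or a 0 anywhere but the last visited position).
-- intended difference: On a negative in-range curr_ind with some array element divisible by prev_num, A's negative-index recursion accidentally walks the suffix and then the whole array again and returns a chain drawn from that doubled walk (for arr = 2,3 and curr_ind = -1 it returns the chain 3,3), while B returns the longest divisible chain of the suffix itself (the single chain 3), the intended meaning of a start index. — e.g. on get_largest_subset([2, 3], 1, -1, []): A returns [3, 3], B returns [3]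
import Mathlib
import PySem

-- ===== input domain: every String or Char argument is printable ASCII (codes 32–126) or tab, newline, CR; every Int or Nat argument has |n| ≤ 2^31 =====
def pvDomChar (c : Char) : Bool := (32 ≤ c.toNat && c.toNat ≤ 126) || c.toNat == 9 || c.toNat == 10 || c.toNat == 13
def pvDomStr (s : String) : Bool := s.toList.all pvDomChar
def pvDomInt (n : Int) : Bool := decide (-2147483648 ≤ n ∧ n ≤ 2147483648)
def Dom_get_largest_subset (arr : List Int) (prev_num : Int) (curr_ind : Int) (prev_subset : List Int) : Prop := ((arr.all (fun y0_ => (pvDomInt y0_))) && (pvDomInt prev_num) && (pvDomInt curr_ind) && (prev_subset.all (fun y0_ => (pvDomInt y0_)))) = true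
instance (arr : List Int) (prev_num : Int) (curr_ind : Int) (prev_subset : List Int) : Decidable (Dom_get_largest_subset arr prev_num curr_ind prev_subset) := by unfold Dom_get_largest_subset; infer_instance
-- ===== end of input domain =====

-- B replaces A's exponential branching search by an O(n^2) right-to-left DP over the
-- suffix arr[curr_ind:] with a skip-preferring reconstruction; equality of RETURN
-- values is what is proved (A returns its prev_subset argument itself, B a copy).

-- ===== PORT A =====
-- literal port of A's recursion; the `none` branch is where Python raises IndexError
-- (excluded by Pre_)
def get_largest_subset (arr : List Int) (prev_num : Int) (curr_ind : Int) (prev_subset : List Int) : List Int :=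
  if curr_ind = (arr.length : Int) then prev_subset
  else
    match h : PySem.List.pyGet? arr curr_ind with
    | none => prev_subset
    | some curr_num =>
      let alt_0 := get_largest_subset arr prev_num (curr_ind + 1) prev_subset
      if PySem.Int.mod curr_num prev_num = 0 then
        let alt_1 := get_largest_subset arr curr_num (curr_ind + 1) (prev_subset ++ [curr_num])
        if alt_1.length > alt_0.length then alt_1 else alt_0
      else alt_0
termination_by ((arr.length : Int) - curr_ind).toNat
decreasing_by
  all_goals
    have hin : ¬ PySem.List.pyGet? arr curr_ind = none := by simp [h]
    rw [PySem.List.pyGet?_eq_none_iff] at hin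
    have := not_not.mp hin
    unfold PySem.Raise.InRange at this
    omega

-- ===== PORT B =====
-- port of Source B's helper _best(d, pairs)
def pvBest (d : Int) (pairs : List (Int × Int)) : Int :=
  pairs.foldl (fun best wt => if PySem.Int.mod wt.1 d = 0 ∧ wt.2 > best then wt.2 else best) 0

-- port of Source B's while-loop over pairs (res/prev accumulators)
def pvRecon (pairs : List (Int × Int)) (prev : Int) (res : List Int) : List Int :=
  match pairs with
  | [] => res
  | (v, t) :: rest =>
    if PySem.Int.mod v prev = 0 ∧ t > pvBest prev rest then pvRecon rest v (res ++ [v])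
    else pvRecon rest prev res

def get_largest_subset_alt (arr : List Int) (prev_num : Int) (curr_ind : Int) (prev_subset : List Int) : List Int :=
  let vals := PySem.List.slice arr (some curr_ind) none
  let pairs := vals.reverse.foldl (fun pairs v => (v, 1 + pvBest v pairs) :: pairs) []
  pvRecon pairs prev_num prev_subset

-- ===== PRECONDITION & SPEC =====
-- Pre_ excludes exactly the inputs where A raises: an out-of-range curr_ind
-- (IndexError) and the ZeroDivisionError cases prev_num = 0 or a 0 anywhere but in
-- the last visited position (a taken 0 becomes the next divisor).
def Pre_get_largest_subset (arr : List Int) (prev_num : Int) (curr_ind : Int) (prev_subset : List Int) : Prop :=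
  curr_ind = (arr.length : Int) ∨
  (-(arr.length : Int) ≤ curr_ind ∧ curr_ind < (arr.length : Int) ∧ prev_num ≠ 0 ∧
    ∀ x ∈ (if curr_ind < 0 then arr.drop ((arr.length : Int) + curr_ind).toNat ++ arr
           else arr.drop curr_ind.toNat).dropLast, x ≠ 0)
instance (arr : List Int) (prev_num : Int) (curr_ind : Int) (prev_subset : List Int) : Decidable (Pre_get_largest_subset arr prev_num curr_ind prev_subset) := by unfold Pre_get_largest_subset; infer_instance

def pvWitness_get_largest_subset : List Int × Int × Int × List Int := ([3, 9, 2, 4, 8], 1, 0, [])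

-- On a negative in-range curr_ind with some array element divisible by prev_num,
-- A's negative-index recursion accidentally walks the suffix AND then the whole
-- array again and returns a chain drawn from that doubled walk; B returns the
-- longest divisible chain of the suffix arr[curr_ind:] itself, the intended
-- meaning of a start index.
def D_get_largest_subset (arr : List Int) (prev_num : Int) (curr_ind : Int) (prev_subset : List Int) : Prop :=
  -(arr.length : Int) ≤ curr_ind ∧ curr_ind < 0 ∧ ∃ x ∈ arr, PySem.Int.mod x prev_num = 0
instance (arr : List Int) (prev_num : Int) (curr_ind : Int) (prev_subset : List Int) : Decidable (D_get_largest_subset arr prev_num curr_ind prev_subset) := by unfold D_get_largest_subset; infer_instance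

def Spec_get_largest_subset (arr : List Int) (prev_num : Int) (curr_ind : Int) (prev_subset : List Int) (out : List Int) : Prop := ¬ D_get_largest_subset arr prev_num curr_ind prev_subset → out = get_largest_subset_alt arr prev_num curr_ind prev_subset
instance (arr : List Int) (prev_num : Int) (curr_ind : Int) (prev_subset : List Int) (out : List Int) : Decidable (Spec_get_largest_subset arr prev_num curr_ind prev_subset out) := by unfold Spec_get_largest_subset; infer_instance

def pvDiffWitness_get_largest_subset : List Int × Int × Int × List Int := ([2, 3], 1, -1, [])
def pvDiffWitnessOut_get_largest_subset : (List Int) × (List Int) := ([3, 3], [3])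

-- ===== CLAIM (what is proved, stated in full; the proofs are below) =====
def Claim_unchanged_get_largest_subset : Prop := ∀ (arr : List Int) (prev_num : Int) (curr_ind : Int) (prev_subset : List Int), Dom_get_largest_subset arr prev_num curr_ind prev_subset → Pre_get_largest_subset arr prev_num curr_ind prev_subset → Spec_get_largest_subset arr prev_num curr_ind prev_subset (get_largest_subset arr prev_num curr_ind prev_subset)
def Claim_changed_get_largest_subset : Prop := Dom_get_largest_subset (pvDiffWitness_get_largest_subset.1) (pvDiffWitness_get_largest_subset.2.1) (pvDiffWitness_get_largest_subset.2.2.1) (pvDiffWitness_get_largest_subset.2.2.2) ∧ Pre_get_largest_subset (pvDiffWitness_get_largest_subset.1) (pvDiffWitness_get_largest_subset.2.1) (pvDiffWitness_get_largest_subset.2.2.1) (pvDiffWitness_get_largest_subset.2.2.2) ∧ D_get_largest_subset (pvDiffWitness_get_largest_subset.1) (pvDiffWitness_get_largest_subset.2.1) (pvDiffWitness_get_largest_subset.2.2.1) (pvDiffWitness_get_largest_subset.2.2.2) ∧ get_largest_subset (pvDiffWitness_get_largest_subset.1) (pvDiffWitness_get_largest_subset.2.1) (pvDiffWitness_get_largest_subset.2.2.1)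 (pvDiffWitness_get_largest_subset.2.2.2) = pvDiffWitnessOut_get_largest_subset.1 ∧ get_largest_subset_alt (pvDiffWitness_get_largest_subset.1) (pvDiffWitness_get_largest_subset.2.1) (pvDiffWitness_get_largest_subset.2.2.1) (pvDiffWitness_get_largest_subset.2.2.2) = pvDiffWitnessOut_get_largest_subset.2 ∧ pvDiffWitnessOut_get_largest_subset.1 ≠ pvDiffWitnessOut_get_largest_subset.2
def Claim_exact_get_largest_subset : Prop := ∀ (arr : List Int) (prev_num : Int) (curr_ind : Int) (prev_subset : List Int), Dom_get_largest_subset arr prev_num curr_ind prev_subset → Pre_get_largest_subset arr prev_num curr_ind prev_subset → D_get_largest_subset arr prev_num curr_ind prev_subset → get_largest_subset arr prev_num curr_ind prev_subset ≠ get_largest_subset_alt arr prev_num curr_ind prev_subset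

-- ===== LEMMAS AND PROOFS =====

def pvSpecBest (xs : List Int) (p : Int) : List Int :=
  match xs with
  | [] => []
  | x :: rest =>
    let a0 := pvSpecBest rest p
    if PySem.Int.mod x p = 0 then
      let a1 := x :: pvSpecBest rest x
      if a1.length > a0.length then a1 else a0
    else a0

def pvVisit (arr : List Int) (i : Int) : List Int :=
  match h : PySem.List.pyGet? arr i with
  | none => []
  | some v => v :: pvVisit arr (i + 1)
termination_by ((arr.length : Int) - i).toNat
decreasing_by
  have hin : ¬ PySem.List.pyGet? arr i = none := by simp [h]
  rw [PySem.List.pyGet?_eq_none_iff] at hin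
  have := not_not.mp hin
  unfold PySem.Raise.InRange at this
  omega

theorem pvVisit_of_none (arr : List Int) (i : Int) (h : PySem.List.pyGet? arr i = none) : pvVisit arr i = [] := by
  rw [pvVisit, h]

theorem pvVisit_of_some (arr : List Int) (i : Int) (v : Int) (h : PySem.List.pyGet? arr i = some v) : pvVisit arr i = v :: pvVisit arr (i+1) := by
  rw [pvVisit, h]

def pvPairs (xs : List Int) : List (Int × Int) :=
  xs.reverse.foldl (fun pairs v => (v, 1 + pvBest v pairs) :: pairs) []

theorem pvA_eq_spec (arr : List Int) (p i : Int) (sub : List Int) :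
    get_largest_subset arr p i sub = sub ++ pvSpecBest (pvVisit arr i) p := by
  fun_induction get_largest_subset arr p i sub with
  | case1 p sub =>
      have hz : PySem.List.pyGet? arr ((arr.length : Int)) = none := by
        rw [PySem.List.pyGet?_eq_none_iff]
        unfold PySem.Raise.InRange
        omega
      rw [pvVisit_of_none _ _ hz]
      simp [pvSpecBest]
  | case2 p i sub hne hnone =>
      rw [pvVisit_of_none _ _ hnone]
      simp [pvSpecBest]
  | case3 p i sub hne v hsome _a0 hmod _a1 hgt ih0 ih1 =>
      rw [pvVisit_of_some _ _ _ hsome]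
      simp only [pvSpecBest, if_pos hmod]
      have hgt' : (get_largest_subset arr v (i + 1) (sub ++ [v])).length > (get_largest_subset arr p (i + 1) sub).length := hgt
      rw [ih0, ih1] at hgt'
      simp only [List.length_append, List.length_cons, List.length_nil] at hgt'
      show get_largest_subset arr v (i + 1) (sub ++ [v]) = _
      rw [ih1]
      rw [if_pos (by simp only [List.length_cons]; omega)]
      simp
  | case4 p i sub hne v hsome _a0 hmod _a1 hle ih0 ih1 =>
      rw [pvVisit_of_some _ _ _ hsome]
      simp only [pvSpecBest, if_pos hmod]
      have hle' : ¬ (get_largest_subset arr v (i + 1) (sub ++ [v])).length > (get_largest_subset arr p (i + 1) sub).length := hle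
      rw [ih0, ih1] at hle'
      simp only [List.length_append, List.length_cons, List.length_nil] at hle'
      show get_largest_subset arr p (i + 1) sub = _
      rw [ih0]
      rw [if_neg (by simp only [List.length_cons]; omega)]
  | case5 p i sub hne v hsome _a0 hmod ih =>
      rw [pvVisit_of_some _ _ _ hsome]
      simp only [pvSpecBest, if_neg hmod]
      exact ih

theorem pvVisit_nonneg (arr : List Int) (i : Int) (h : 0 ≤ i) :
    pvVisit arr i = arr.drop i.toNat := by
  by_cases hlt : i < (arr.length : Int)
  · have hsome : PySem.List.pyGet? arr i = some arr[i.toNat] := by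
      rw [PySem.List.pyGet?_of_nonneg arr h, List.getElem?_eq_getElem (by omega)]
    rw [pvVisit_of_some _ _ _ hsome, pvVisit_nonneg arr (i + 1) (by omega)]
    rw [List.drop_eq_getElem_cons (show i.toNat < arr.length by omega)]
    congr 2
    omega
  · have hz : PySem.List.pyGet? arr i = none := by
      rw [PySem.List.pyGet?_eq_none_iff]; unfold PySem.Raise.InRange; omega
    rw [pvVisit_of_none _ _ hz, List.drop_eq_nil_of_le (by omega)]
termination_by ((arr.length : Int) - i).toNat
decreasing_by omega

theorem pvVisit_neg (arr : List Int) (i : Int) (h1 : -(arr.length : Int) ≤ i) (h2 : i < 0) :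
    pvVisit arr i = arr.drop ((arr.length : Int) + i).toNat ++ arr := by
  obtain ⟨k, hk0, hkle, rfl⟩ : ∃ k : Nat, 0 < k ∧ k ≤ arr.length ∧ i = -(k:Int) :=
    ⟨(-i).toNat, by omega, by omega, by omega⟩
  have htn : ((arr.length : Int) + -(k:Int)).toNat = arr.length - k := by omega
  have hsome : PySem.List.pyGet? arr (-(k:Int)) = some arr[arr.length - k] := by
    rw [PySem.List.pyGet?_neg_natCast arr k hk0 hkle, List.getElem?_eq_getElem (by omega)]
  rw [pvVisit_of_some _ _ _ hsome, htn]
  rcases Nat.lt_or_ge 1 k with h1k | h1k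
  · have heq : -((k:Nat):Int) + 1 = -(((k - 1 : Nat)):Int) := by omega
    rw [heq, pvVisit_neg arr (-(((k - 1 : Nat)):Int)) (by omega) (by omega)]
    have htn2 : ((arr.length : Int) + -((k - 1 : Nat):Int)).toNat = arr.length - k + 1 := by omega
    rw [htn2, ← List.cons_append, ← List.drop_eq_getElem_cons (show arr.length - k < arr.length by omega)]
  · have hz : -((k:Nat):Int) + 1 = 0 := by omega
    rw [hz, pvVisit_nonneg arr 0 (by omega)]
    rw [List.drop_eq_getElem_cons (show arr.length - k < arr.length by omega)]
    have h2' : arr.length - k + 1 = arr.length := by omega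
    rw [h2']
    simp
termination_by (-i).toNat
decreasing_by omega

def pvMaxSel (d : Int) (pairs : List (Int × Int)) : Int :=
  match pairs with
  | [] => 0
  | (w, t) :: r => if PySem.Int.mod w d = 0 ∧ t > pvMaxSel d r then t else pvMaxSel d r

theorem pvMaxSel_nonneg (d : Int) (pairs : List (Int × Int)) : 0 ≤ pvMaxSel d pairs := by
  induction pairs with
  | nil => simp [pvMaxSel]
  | cons hd tl ih =>
    obtain ⟨w, t⟩ := hd
    simp only [pvMaxSel]
    split_ifs with h
    · omega
    · exact ih

theorem pvBest_foldl (d : Int) (pairs : List (Int × Int)) :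
    ∀ b : Int, 0 ≤ b →
      pairs.foldl (fun best wt => if PySem.Int.mod wt.1 d = 0 ∧ wt.2 > best then wt.2 else best) b
        = max b (pvMaxSel d pairs) := by
  induction pairs with
  | nil => intro b hb; simp [pvMaxSel]; omega
  | cons hd tl ih =>
    intro b hb
    obtain ⟨w, t⟩ := hd
    simp only [List.foldl_cons, pvMaxSel]
    have hms := pvMaxSel_nonneg d tl
    by_cases hw : PySem.Int.mod w d = 0
    · by_cases htb : t > b
      · rw [if_pos ⟨hw, htb⟩, ih t (by omega)]
        split_ifs with h <;> omega
      · rw [if_neg (by tauto), ih b hb]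
        split_ifs with h <;> omega
    · rw [if_neg (by tauto), if_neg (by tauto), ih b hb]

theorem pvBest_eq_maxSel (d : Int) (pairs : List (Int × Int)) :
    pvBest d pairs = pvMaxSel d pairs := by
  rw [pvBest, pvBest_foldl d pairs 0 le_rfl]
  have := pvMaxSel_nonneg d pairs
  omega

theorem pvPairs_cons (x : Int) (xs : List Int) :
    pvPairs (x :: xs) = (x, 1 + pvBest x (pvPairs xs)) :: pvPairs xs := by
  rw [pvPairs, pvPairs, List.reverse_cons, List.foldl_append]
  simp

theorem pvBest_pairs (xs : List Int) : ∀ d : Int,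
    pvBest d (pvPairs xs) = ((pvSpecBest xs d).length : Int) := by
  induction xs with
  | nil => intro d; simp [pvPairs, pvBest, pvSpecBest]
  | cons x xs ih =>
    intro d
    rw [pvPairs_cons, pvBest_eq_maxSel]
    simp only [pvMaxSel]
    rw [← pvBest_eq_maxSel, ih d, ih x]
    simp only [pvSpecBest]
    split_ifs with h1 h2 h2 <;> simp_all <;> omega

theorem pvRecon_pairs (xs : List Int) : ∀ (p : Int) (res : List Int),
    pvRecon (pvPairs xs) p res = res ++ pvSpecBest xs p := by
  induction xs with
  | nil => intro p res; simp [pvPairs, pvRecon, pvSpecBest]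
  | cons x xs ih =>
    intro p res
    rw [pvPairs_cons]
    simp only [pvRecon]
    rw [pvBest_pairs xs x, pvBest_pairs xs p]
    simp only [pvSpecBest]
    by_cases hx : PySem.Int.mod x p = 0
    · by_cases hlen : (1 : Int) + ((pvSpecBest xs x).length : Int) > ((pvSpecBest xs p).length : Int)
      · rw [if_pos ⟨hx, hlen⟩, ih x (res ++ [x])]
        rw [if_pos hx, if_pos (by simp only [List.length_cons]; omega)]
        simp
      · rw [if_neg (by tauto), ih p res]
        rw [if_pos hx, if_neg (by simp only [List.length_cons]; omega)]
    · rw [if_neg (by tauto), ih p res, if_neg hx]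

theorem pvAlt_eq (arr : List Int) (p i : Int) (sub : List Int) :
    get_largest_subset_alt arr p i sub
      = sub ++ pvSpecBest (PySem.List.slice arr (some i) none) p := by
  rw [get_largest_subset_alt]
  exact pvRecon_pairs _ p sub

theorem pvSlice_neg (arr : List Int) (i : Int) (h1 : -(arr.length : Int) ≤ i) (h2 : i < 0) :
    PySem.List.slice arr (some i) none = arr.drop ((arr.length : Int) + i).toNat := by
  rw [PySem.List.slice_some_none]
  have hcl : PySem.List.clampIdx arr.length i = ((arr.length : Int) + i).toNat := by
    rw [show i = -((((-i).toNat : Nat)) : Int) from by omega,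
        PySem.List.clampIdx_neg_natCast arr.length (-i).toNat (by omega)]
    omega
  rw [hcl]

theorem pvSpecBest_nil_of (xs : List Int) (p : Int) (h : ∀ x ∈ xs, PySem.Int.mod x p ≠ 0) :
    pvSpecBest xs p = [] := by
  induction xs with
  | nil => rfl
  | cons x rest ih =>
    simp only [pvSpecBest]
    rw [if_neg (h x (by simp))]
    exact ih (fun y hy => h y (by simp [hy]))

-- a divisible chain: each element is divisible by its predecessor (p for the first)
def pvChain (p : Int) (c : List Int) : Prop :=
  match c with
  | [] => True
  | x :: r => PySem.Int.mod x p = 0 ∧ pvChain x r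

theorem pvSpec_sublist (xs : List Int) : ∀ p : Int, (pvSpecBest xs p).Sublist xs := by
  induction xs with
  | nil => intro p; simp [pvSpecBest]
  | cons x rest ih =>
    intro p
    simp only [pvSpecBest]
    split_ifs with h1 h2
    · exact (ih x).cons₂ x
    · exact (ih p).cons x
    · exact (ih p).cons x

theorem pvSpec_chain (xs : List Int) : ∀ p : Int, pvChain p (pvSpecBest xs p) := by
  induction xs with
  | nil => intro p; simp [pvSpecBest, pvChain]
  | cons x rest ih =>
    intro p
    simp only [pvSpecBest]
    split_ifs with h1 h2
    · exact ⟨h1, ih x⟩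
    · exact ih p
    · exact ih p

theorem pvSpec_opt (xs : List Int) : ∀ (p : Int) (c : List Int),
    c.Sublist xs → pvChain p c → c.length ≤ (pvSpecBest xs p).length := by
  induction xs with
  | nil => intro p c hs _; simp [List.sublist_nil.mp hs, pvSpecBest]
  | cons x rest ih =>
    intro p c hs hc
    cases hs with
    | cons _ hs' =>
      have h0 := ih p c hs' hc
      simp only [pvSpecBest]
      split_ifs with h1 h2
      · simp only [List.length_cons] at h2 ⊢
        omega
      · exact h0
      · exact h0
    | cons₂ _ hs' =>
      obtain ⟨hx, hch⟩ := hc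
      have h1 := ih x _ hs' hch
      simp only [pvSpecBest, if_pos hx]
      split_ifs with h2
      · simp only [List.length_cons] at h2 ⊢
        omega
      · simp only [List.length_cons] at h2 ⊢
        omega

-- last element of a chain, p when empty (proof-side helper)
def pvLastD (c : List Int) (p : Int) : Int :=
  match c with
  | [] => p
  | x :: r => pvLastD r x

theorem pvChain_snoc (c : List Int) : ∀ (p y : Int), pvChain p c →
    PySem.Int.mod y (pvLastD c p) = 0 → pvChain p (c ++ [y]) := by
  induction c with
  | nil => intro p y _ hy; exact ⟨hy, trivial⟩
  | cons x r ih =>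
    intro p y hc hy
    obtain ⟨hx, hr⟩ := hc
    exact ⟨hx, ih x y hr hy⟩

theorem pvLastD_mem (c : List Int) : ∀ p : Int, c ≠ [] → pvLastD c p ∈ c := by
  induction c with
  | nil => intro p h; exact absurd rfl h
  | cons x r ih =>
    intro p _
    cases r with
    | nil => simp [pvLastD]
    | cons y s => exact List.mem_cons_of_mem x (ih x (by simp))

theorem pvMod_self (x : Int) : PySem.Int.mod x x = 0 :=
  (PySem.Int.mod_eq_zero_iff_dvd x x).mpr dvd_rfl

-- the key length gap: the doubled walk always carries a strictly longer chain
theorem pvLen_lt (arr suf : List Int) (p x : Int) (hsub : suf.Sublist arr)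
    (hx : x ∈ arr) (hmod : PySem.Int.mod x p = 0) :
    (pvSpecBest suf p).length < (pvSpecBest (suf ++ arr) p).length := by
  by_cases hc : pvSpecBest suf p = []
  · have hxs : [x].Sublist (suf ++ arr) :=
      (List.singleton_sublist.mpr hx).trans (List.sublist_append_right suf arr)
    have := pvSpec_opt (suf ++ arr) p [x] hxs ⟨hmod, trivial⟩
    simp only [List.length_cons, List.length_nil] at this
    rw [hc]
    simpa using this
  · set c := pvSpecBest suf p with hcdef
    set y := pvLastD c p with hydef
    have hymem : y ∈ c := pvLastD_mem c p hc
    have hyarr : y ∈ arr := hsub.subset ((pvSpec_sublist suf p).subset hymem)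
    have hcsub : (c ++ [y]).Sublist (suf ++ arr) :=
      (pvSpec_sublist suf p).append (List.singleton_sublist.mpr hyarr)
    have hchain : pvChain p (c ++ [y]) :=
      pvChain_snoc c p y (pvSpec_chain suf p) (by rw [← hydef]; exact pvMod_self y)
    have := pvSpec_opt (suf ++ arr) p (c ++ [y]) hcsub hchain
    simp only [List.length_append, List.length_cons, List.length_nil] at this
    omega

-- ===== VERDICT (by name: the statement is the Claim_ definition above) =====
theorem get_largest_subset_spec : Claim_unchanged_get_largest_subset := by
  intro arr p i sub _dom hpre
  unfold Spec_get_largest_subset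
  intro hnd
  unfold Pre_get_largest_subset at hpre
  rw [pvA_eq_spec, pvAlt_eq]
  rcases hpre with hlen | ⟨hge, hlt, hp, _hz⟩
  · subst hlen
    have hnone : PySem.List.pyGet? arr ((arr.length : Int)) = none := by
      rw [PySem.List.pyGet?_eq_none_iff]; unfold PySem.Raise.InRange; omega
    rw [pvVisit_of_none _ _ hnone, PySem.List.slice_from arr (by omega)]
    rw [show ((arr.length : Int)).toNat = arr.length by omega]
    simp [pvSpecBest]
  · congr 1
    by_cases hneg : i < 0
    · have hnodiv : ∀ x ∈ arr, PySem.Int.mod x p ≠ 0 := by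
        intro x hxm hxd
        exact hnd ⟨hge, hneg, x, hxm, hxd⟩
      rw [pvVisit_neg arr i hge hneg, pvSlice_neg arr i hge hneg]
      rw [pvSpecBest_nil_of _ p (fun y hy => hnodiv y (by
            rcases List.mem_append.mp hy with h | h
            · exact (List.drop_sublist _ _).subset h
            · exact h)),
          pvSpecBest_nil_of _ p (fun y hy => hnodiv y ((List.drop_sublist _ _).subset hy))]
    · rw [pvVisit_nonneg arr i (by omega), PySem.List.slice_from arr (by omega)]

theorem pvA_witness : get_largest_subset [2, 3] 1 (-1) [] = [3, 3] := by
  have h := pvA_eq_spec [2, 3] 1 (-1) []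
  rw [pvVisit_neg [2, 3] (-1) (by norm_num) (by norm_num)] at h
  rw [h]
  decide

theorem get_largest_subset_changed : Claim_changed_get_largest_subset := by
  unfold Claim_changed_get_largest_subset
  refine ⟨by decide, by decide, by decide, ?_, by decide, by decide⟩
  show get_largest_subset [2, 3] 1 (-1) [] = [3, 3]
  exact pvA_witness

theorem get_largest_subset_tight : Claim_exact_get_largest_subset := by
  intro arr p i sub _dom _hpre hd
  obtain ⟨hge, hneg, x, hx, hmod⟩ := hd
  rw [pvA_eq_spec, pvAlt_eq, pvVisit_neg arr i hge hneg, pvSlice_neg arr i hge hneg]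
  intro heq
  have h2 := List.append_cancel_left heq
  have := pvLen_lt arr (arr.drop ((arr.length : Int) + i).toNat) p x
            (List.drop_sublist _ _) hx hmod
  rw [h2] at this
  omega
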